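-- pv_equiv track=rewrite | github.com/RamananVr/Leetcodepython | stack_greedy_algorithm/2030_Smallest_K-Length_Subsequence_With_Occurrences_of_a_Letter.py | smallestSubsequence
-- ===== SOURCE A (Python) =====
-- def smallestSubsequence(s: str, k: int, letter: str, repetition: int) -> str:
--     stack = []
--     count_letter = s.count(letter)
--     for i, char in enumerate(s):
--         # While the stack is not empty, and the current character is smaller than the top of the stack,
--         # and we can still form a valid subsequence after removing the top of the stack, pop the stack.
--         while (stack and stack[-1] > char and
--                len(stack) + len(s) - i - 1 >= k and
--                (stack[-1] != letter or count_letter > repetition)):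
--             if stack[-1] == letter:
--                 repetition += 1
--             stack.pop()
--
--         # Add the current character to the stack if it doesn't exceed the required length.
--         if len(stack) < k:
--             if char == letter:
--                 stack.append(char)
--                 repetition -= 1
--             elif k - len(stack) > repetition:
--                 stack.append(char)
--
--         # Decrease the count of the current character if it's the target letter.
--         if char == letter:
--             count_letter -= 1
--
--     return ''.join(stack)
-- ===== SOURCE B (Python) =====
-- def smallestSubsequence(s: str, k: int, letter: str, repetition: int) -> str:
--     n = len(s)
--     # run-length encode the input
--     runs = []
--     for ch in s:
--         if runs and runs[-1][0] == ch:
--             runs[-1][1] += 1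
--         else:
--             runs.append([ch, 1])
--
--     cnt = s.count(letter)
--     stack = []   # run-length-encoded result: [char, multiplicity], bottom to top
--     m = 0        # total multiplicity held in stack
--     rep = repetition
--     i = 0        # index in s of the current run's first character
--     for c, L in runs:
--         # batched pop phase (only the run's first position can trigger pops)
--         while stack:
--             t, g = stack[-1]
--             if not (t > c):
--                 break
--             p = min(g, m + n - i - k)
--             if t == letter:
--                 p = min(p, cnt - rep)
--             if p <= 0:
--                 break
--             if t == letter:
--                 rep += p
--             m -= p
--             if p == g:
--                 stack.pop()
--             else:
--                 stack[-1][1] = g - p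
--                 break
--         # batched push phase
--         if c == letter:
--             t_push = min(L, k - m)
--             if t_push > 0:
--                 stack.append([c, t_push])
--                 m += t_push
--                 rep -= t_push
--             cnt -= L
--         else:
--             t_push = min(L, k - m, k - m - rep)
--             if t_push > 0:
--                 stack.append([c, t_push])
--                 m += t_push
--         i += L
--     return ''.join(c * g for c, g in stack)
-- ===== Notes on version B (the rewrite author's own statement) =====
-- stated objective: alternative
-- what changed: B run-length encodes both the input traversal and the result: instead of A's per-character monotonic-stack loop with pop-one-at-a-time and push-one-at-a-time, B iterates over runs of equal characters keeping a stack of (char, multiplicity) groups, computing each batch of pops and pushes in closed form (min/count arithmetic) per run.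
import Mathlib
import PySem

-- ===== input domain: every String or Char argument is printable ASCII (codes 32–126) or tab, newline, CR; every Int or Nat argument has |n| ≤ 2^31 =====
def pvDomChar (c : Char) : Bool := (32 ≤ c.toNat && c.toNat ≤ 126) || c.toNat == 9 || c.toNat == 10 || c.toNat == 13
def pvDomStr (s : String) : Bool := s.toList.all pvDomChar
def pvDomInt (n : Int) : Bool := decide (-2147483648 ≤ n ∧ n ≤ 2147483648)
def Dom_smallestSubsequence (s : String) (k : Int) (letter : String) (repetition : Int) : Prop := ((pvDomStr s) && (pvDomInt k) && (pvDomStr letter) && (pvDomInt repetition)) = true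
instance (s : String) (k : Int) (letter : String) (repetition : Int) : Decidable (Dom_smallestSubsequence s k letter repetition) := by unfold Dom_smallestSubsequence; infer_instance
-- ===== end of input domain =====

-- B re-implements the same exact behaviour on a different data structure: it run-length
-- encodes the input and the result and replaces A's per-character pops/pushes by
-- closed-form batched updates per run (objective: alternative; same O(n) cost).


-- ===== PORT A =====
-- A's Python stack holds 1-char strings; here the stack is the char list kept top-first
-- (Python's list reversed), joined back with .reverse at the end.
-- The inner while loop:
def pvPopA (lt : List Char) (k cnt remAfter : Int) (ch : Char) :
    List Char → Int → List Char × Int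
  | [], rep => ([], rep)
  | top :: rest, rep =>
    if ch < top ∧ ((rest.length : Int) + 1 + remAfter ≥ k) ∧ (lt ≠ [top] ∨ cnt > rep) then
      pvPopA lt k cnt remAfter ch rest (if lt = [top] then rep + 1 else rep)
    else (top :: rest, rep)

-- the for loop over enumerate(s), state = (stack reversed, repetition, count_letter):
def pvLoopA (lt : List Char) (k n : Int) :
    List Char → Int → List Char × Int × Int → List Char
  | [], _, st => st.1
  | ch :: rest, i, (rev, rep, cnt) =>
    let pr := pvPopA lt k cnt (n - i - 1) ch rev rep
    let st2 : List Char × Int :=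
      if (pr.1.length : Int) < k then
        if lt = [ch] then (ch :: pr.1, pr.2 - 1)
        else if k - (pr.1.length : Int) > pr.2 then (ch :: pr.1, pr.2)
        else (pr.1, pr.2)
      else (pr.1, pr.2)
    pvLoopA lt k n rest (i + 1) (st2.1, st2.2, if lt = [ch] then cnt - 1 else cnt)

def smallestSubsequence (s : String) (k : Int) (letter : String) (repetition : Int) : String :=
  let cs := s.toList
  String.mk (pvLoopA letter.toList k (cs.length : Int) cs 0
      ([], repetition, (PySem.Str.count s letter : Int))).reverse

-- ===== PORT B =====
-- Source B traverses the string as RUNS of equal characters and keeps the result as a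
-- run-length-encoded stack [(char, multiplicity)], popping/pushing whole batches
-- computed arithmetically.  Stacks/run lists built by Python appends are kept
-- head-first here and reversed where Source B reads them left to right.
def pvFlatR (rs : List (Char × Int)) : List Char :=
  rs.flatMap (fun p => List.replicate p.2.toNat p.1)

-- run-length encoding pass (Source B's first loop; runs accumulated head-first)
def pvRLErev (cs : List Char) : List (Char × Int) :=
  cs.foldl (fun rs ch =>
    match rs with
    | (c, g) :: rest => if c = ch then (c, g + 1) :: rest else (ch, 1) :: (c, g) :: rest
    | [] => [(ch, 1)]) []

-- Source B's batched pop loop; group stack top-first, state (m, rep)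
def pvPopB (lt : List Char) (k cnt n i : Int) (c : Char) :
    List (Char × Int) → Int → Int → List (Char × Int) × Int × Int
  | [], m, rep => ([], m, rep)
  | (t, g) :: rest, m, rep =>
    if c < t then
      let p0 := min g (m + n - i - k)
      let p := if lt = [t] then min p0 (cnt - rep) else p0
      if p ≤ 0 then ((t, g) :: rest, m, rep)
      else
        let rep' := if lt = [t] then rep + p else rep
        if p = g then pvPopB lt k cnt n i c rest (m - p) rep'
        else ((t, g - p) :: rest, m - p, rep')
    else ((t, g) :: rest, m, rep)

-- Source B's loop over the runs, state = (group stack top-first, m, rep, cnt)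
def pvLoopB (lt : List Char) (k n : Int) :
    List (Char × Int) → Int → List (Char × Int) × Int × Int × Int → List (Char × Int)
  | [], _, st => st.1
  | (c, L) :: rest, i, (stk, m, rep, cnt) =>
    let pr := pvPopB lt k cnt n i c stk m rep
    let st2 : List (Char × Int) × Int × Int × Int :=
      if lt = [c] then
        let t := min L (k - pr.2.1)
        if 0 < t then ((c, t) :: pr.1, pr.2.1 + t, pr.2.2 - t, cnt - L)
        else (pr.1, pr.2.1, pr.2.2, cnt - L)
      else
        let t := min L (min (k - pr.2.1) (k - pr.2.1 - pr.2.2))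
        if 0 < t then ((c, t) :: pr.1, pr.2.1 + t, pr.2.2, cnt)
        else (pr.1, pr.2.1, pr.2.2, cnt)
    pvLoopB lt k n rest (i + L) st2

def smallestSubsequence_alt (s : String) (k : Int) (letter : String) (repetition : Int) : String :=
  let cs := s.toList
  let runs := (pvRLErev cs).reverse
  String.mk (pvFlatR (pvLoopB letter.toList k (cs.length : Int) runs 0
      ([], 0, repetition, (PySem.Str.count s letter : Int))).reverse)

-- ===== PRECONDITION & SPEC =====
def Spec_smallestSubsequence (s : String) (k : Int) (letter : String) (repetition : Int) (out : String) : Prop := out = smallestSubsequence_alt s k letter repetition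
instance (s : String) (k : Int) (letter : String) (repetition : Int) (out : String) : Decidable (Spec_smallestSubsequence s k letter repetition out) := by unfold Spec_smallestSubsequence; infer_instance

-- ===== CLAIM (what is proved, stated in full; the proofs are below) =====
def Claim_equal_smallestSubsequence : Prop := ∀ (s : String) (k : Int) (letter : String) (repetition : Int), Dom_smallestSubsequence s k letter repetition → Spec_smallestSubsequence s k letter repetition (smallestSubsequence s k letter repetition)

-- ===== LEMMAS AND PROOFS =====

-- every multiplicity in a run/group list is ≥ 1
def pvWF (rs : List (Char × Int)) : Prop := ∀ p ∈ rs, 1 ≤ p.2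

-- the head of the stack cannot be popped (state (remAfter, cnt, rep))
def pvBlocked (lt : List Char) (k cnt remAfter : Int) (ch : Char) (rep : Int) :
    List Char → Prop
  | [] => True
  | top :: rest =>
    ¬(ch < top ∧ ((rest.length : Int) + 1 + remAfter ≥ k) ∧ (lt ≠ [top] ∨ cnt > rep))

-- A's single push step (the body of pvLoopA after the pop phase)
def pvStep (lt : List Char) (k : Int) (ch : Char) :
    List Char × Int × Int → List Char × Int × Int
  | (st, rep, cnt) =>
    let st2 : List Char × Int :=
      if (st.length : Int) < k then
        if lt = [ch] then (ch :: st, rep - 1)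
        else if k - (st.length : Int) > rep then (ch :: st, rep)
        else (st, rep)
      else (st, rep)
    (st2.1, st2.2, if lt = [ch] then cnt - 1 else cnt)

def pvStepIter (lt : List Char) (k : Int) (ch : Char) :
    Nat → List Char × Int × Int → List Char × Int × Int
  | 0, σ => σ
  | j + 1, σ => pvStepIter lt k ch j (pvStep lt k ch σ)

theorem pvPopA_blocked (lt : List Char) (k cnt ra : Int) (ch : Char)
    (st : List Char) (rep : Int) (h : pvBlocked lt k cnt ra ch rep st) :
    pvPopA lt k cnt ra ch st rep = (st, rep) := by
  cases st with
  | nil => simp [pvPopA]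
  | cons top rest => simp only [pvBlocked] at h; rw [pvPopA, if_neg h]

theorem pvBlocked_mono (lt : List Char) (k cnt cnt' ra ra' : Int) (ch : Char)
    (st : List Char) (rep : Int) (hra : ra' ≤ ra) (hc : cnt' ≤ cnt)
    (h : pvBlocked lt k cnt ra ch rep st) : pvBlocked lt k cnt' ra' ch rep st := by
  cases st with
  | nil => trivial
  | cons top rest =>
    simp only [pvBlocked] at h ⊢
    intro hcon
    exact h ⟨hcon.1, by omega, hcon.2.2.imp id (fun hg => by omega)⟩

theorem pvBlocked_head (lt : List Char) (k cnt ra : Int) (ch : Char)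
    (rest : List Char) (rep : Int) : pvBlocked lt k cnt ra ch rep (ch :: rest) := by
  simp only [pvBlocked]
  intro hcon
  exact absurd hcon.1 (lt_irrefl ch)

-- batch pop size for one group of gn copies of t (xsl = length below the group)
def pvP (lt : List Char) (t : Char) (k ra cnt : Int) (gn xsl rep : Int) : Int :=
  if lt = [t] then min (min gn (gn + xsl + ra + 1 - k)) (cnt - rep)
  else min gn (gn + xsl + ra + 1 - k)

def pvR (lt : List Char) (t : Char) (rep p : Int) : Int :=
  if lt = [t] then rep + p else rep

theorem pvPop_group (lt : List Char) (k cnt ra : Int) (c t : Char) :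
    ∀ (gn : Nat) (xs : List Char) (rep : Int), 1 ≤ gn →
      pvPopA lt k cnt ra c (List.replicate gn t ++ xs) rep =
        (if c < t ∧ 0 < pvP lt t k ra cnt gn xs.length rep then
          (if pvP lt t k ra cnt gn xs.length rep = (gn : Int) then
            pvPopA lt k cnt ra c xs (pvR lt t rep (pvP lt t k ra cnt gn xs.length rep))
          else
            (List.replicate (gn - (pvP lt t k ra cnt gn xs.length rep).toNat) t ++ xs,
             pvR lt t rep (pvP lt t k ra cnt gn xs.length rep)))
        else (List.replicate gn t ++ xs, rep)) := by
  intro gn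
  induction gn with
  | zero => intro xs rep h; omega
  | succ g ihg =>
    intro xs rep _
    have e1 : ((List.replicate g t ++ xs).length : Int) = (g : Int) + xs.length := by simp
    rw [List.replicate_succ, List.cons_append, pvPopA]
    by_cases hl : lt = [t]
    · subst hl
      have hP : pvP [t] t k ra cnt ((g + 1 : Nat) : Int) (xs.length : Int) rep
          = min (min ((g : Int) + 1) ((g : Int) + 1 + (xs.length : Int) + ra + 1 - k)) (cnt - rep) := by
        simp only [pvP, if_pos rfl]; push_cast; ring_nf
      set P := min (min ((g : Int) + 1) ((g : Int) + 1 + (xs.length : Int) + ra + 1 - k)) (cnt - rep) with hPd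
      have hR : ∀ p : Int, pvR [t] t rep p = rep + p := fun p => by simp [pvR]
      have e2 : (if ([t] : List Char) = [t] then rep + 1 else rep) = rep + 1 := if_pos rfl
      rw [hP, e2]
      by_cases hg : c < t ∧ ((g : Int) + (xs.length : Int) + 1 + ra ≥ k) ∧ cnt > rep
      · rw [if_pos (show c < t ∧ ((((List.replicate g t ++ xs).length : Int)) + 1 + ra ≥ k)
            ∧ (¬([t] : List Char) = [t] ∨ cnt > rep) from
            ⟨hg.1, by rw [e1]; exact hg.2.1, Or.inr hg.2.2⟩)]
        have hPpos : 0 < P := by simp only [hPd, min_def] at *; split_ifs at * <;> omega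
        rw [if_pos (⟨hg.1, hPpos⟩ : c < t ∧ 0 < P)]
        by_cases hg1 : g = 0
        · subst hg1
          have hP1 : P = 1 := by simp only [hPd, min_def] at *; split_ifs at * <;> omega
          rw [if_pos (by rw [hP1]; norm_num), hR, hP1]
          norm_num
        · have hgge : 1 ≤ g := by omega
          have hP' : pvP [t] t k ra cnt ((g : Nat) : Int) (xs.length : Int) (rep + 1)
              = P - 1 := by
            simp only [pvP, if_pos rfl]; simp only [hPd, min_def] at *; split_ifs at * <;> omega
          have hR' : ∀ p : Int, pvR [t] t (rep + 1) p = rep + 1 + p := fun p => by simp [pvR]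
          rw [ihg xs (rep + 1) hgge, hP']
          by_cases hP1 : 1 < P
          · rw [if_pos (⟨hg.1, by omega⟩ : c < t ∧ 0 < P - 1)]
            by_cases hTop : P = (g : Int) + 1
            · rw [if_pos (show P - 1 = ((g : Nat) : Int) from by simp only [hPd, min_def] at *; split_ifs at * <;> omega),
                if_pos (show P = (((g + 1 : Nat)) : Int) from by push_cast; omega),
                hR, hR']
              congr 1
              ring
            · rw [if_neg (show ¬(P - 1 = ((g : Nat) : Int)) from by simp only [hPd, min_def] at *; split_ifs at * <;> omega),
                if_neg (show ¬(P = (((g + 1 : Nat)) : Int)) from by push_cast; omega),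
                hR, hR']
              have hab : g - (P - 1).toNat = g + 1 - P.toNat := by simp only [hPd, min_def] at *; split_ifs at * <;> omega
              rw [hab]
              simp only [Prod.mk.injEq, true_and]
              ring
          · have hPeq : P = 1 := by simp only [hPd, min_def] at *; split_ifs at * <;> omega
            rw [if_neg (show ¬(c < t ∧ 0 < P - 1) from by rintro ⟨-, hx⟩; omega),
              if_neg (show ¬(P = (((g + 1 : Nat)) : Int)) from by push_cast; omega), hR]
            have hab : g + 1 - P.toNat = g := by simp only [hPd, min_def] at *; split_ifs at * <;> omega
            rw [hab]
            simp only [Prod.mk.injEq, true_and]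
            omega
      · rw [if_neg (show ¬(c < t ∧ ((((List.replicate g t ++ xs).length : Int)) + 1 + ra ≥ k)
            ∧ (¬([t] : List Char) = [t] ∨ cnt > rep)) from by
            rintro ⟨h1, h2, h3⟩
            rw [e1] at h2
            rcases h3 with h3 | h3
            · exact h3 rfl
            · exact hg ⟨h1, h2, h3⟩)]
        rw [if_neg (show ¬(c < t ∧ 0 < P) from by
          rintro ⟨h1, h2⟩
          refine hg ⟨h1, ?_, ?_⟩ <;> (simp only [hPd, min_def] at *; split_ifs at * <;> omega)),
          ← List.cons_append, ← List.replicate_succ]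
    · have hP : pvP lt t k ra cnt ((g + 1 : Nat) : Int) (xs.length : Int) rep
          = min ((g : Int) + 1) ((g : Int) + 1 + (xs.length : Int) + ra + 1 - k) := by
        simp only [pvP, if_neg hl]; push_cast; ring_nf
      set P := min ((g : Int) + 1) ((g : Int) + 1 + (xs.length : Int) + ra + 1 - k) with hPd
      have hR : ∀ p : Int, pvR lt t rep p = rep := fun p => by simp [pvR, hl]
      have e2 : (if lt = [t] then rep + 1 else rep) = rep := by simp [hl]
      rw [hP, e2]
      by_cases hg : c < t ∧ ((g : Int) + (xs.length : Int) + 1 + ra ≥ k)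
      · rw [if_pos (show c < t ∧ ((((List.replicate g t ++ xs).length : Int)) + 1 + ra ≥ k)
            ∧ (¬lt = [t] ∨ cnt > rep) from ⟨hg.1, by rw [e1]; exact hg.2, Or.inl hl⟩)]
        have hPpos : 0 < P := by simp only [hPd, min_def] at *; split_ifs at * <;> omega
        rw [if_pos (⟨hg.1, hPpos⟩ : c < t ∧ 0 < P)]
        by_cases hg1 : g = 0
        · subst hg1
          have hP1 : P = 1 := by simp only [hPd, min_def] at *; split_ifs at * <;> omega
          rw [if_pos (by rw [hP1]; norm_num), hR]
          norm_num
        · have hgge : 1 ≤ g := by omega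
          have hP' : pvP lt t k ra cnt ((g : Nat) : Int) (xs.length : Int) rep
              = P - 1 := by
            simp only [pvP, if_neg hl]; simp only [hPd, min_def] at *; split_ifs at * <;> omega
          rw [ihg xs rep hgge, hP']
          by_cases hP1 : 1 < P
          · rw [if_pos (⟨hg.1, by omega⟩ : c < t ∧ 0 < P - 1)]
            by_cases hTop : P = (g : Int) + 1
            · rw [if_pos (show P - 1 = ((g : Nat) : Int) from by simp only [hPd, min_def] at *; split_ifs at * <;> omega),
                if_pos (show P = (((g + 1 : Nat)) : Int) from by push_cast; omega),
                hR, hR]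
            · rw [if_neg (show ¬(P - 1 = ((g : Nat) : Int)) from by simp only [hPd, min_def] at *; split_ifs at * <;> omega),
                if_neg (show ¬(P = (((g + 1 : Nat)) : Int)) from by push_cast; omega),
                hR, hR]
              have hab : g - (P - 1).toNat = g + 1 - P.toNat := by simp only [hPd, min_def] at *; split_ifs at * <;> omega
              rw [hab]
          · have hPeq : P = 1 := by simp only [hPd, min_def] at *; split_ifs at * <;> omega
            rw [if_neg (show ¬(c < t ∧ 0 < P - 1) from by rintro ⟨-, hx⟩; omega),
              if_neg (show ¬(P = (((g + 1 : Nat)) : Int)) from by push_cast; omega), hR]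
            have hab : g + 1 - P.toNat = g := by simp only [hPd, min_def] at *; split_ifs at * <;> omega
            rw [hab]
      · rw [if_neg (show ¬(c < t ∧ ((((List.replicate g t ++ xs).length : Int)) + 1 + ra ≥ k)
            ∧ (¬lt = [t] ∨ cnt > rep)) from by
            rintro ⟨h1, h2, h3⟩
            rw [e1] at h2
            exact hg ⟨h1, h2⟩)]
        rw [if_neg (show ¬(c < t ∧ 0 < P) from by
          rintro ⟨h1, h2⟩
          refine hg ⟨h1, ?_⟩
          simp only [hPd, min_def] at *; split_ifs at * <;> omega),
          ← List.cons_append, ← List.replicate_succ]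

theorem pvFlatR_cons_head (t : Char) (g : Int) (rest : List (Char × Int)) (hg : 1 ≤ g) :
    pvFlatR ((t, g) :: rest) = t :: (List.replicate (g.toNat - 1) t ++ pvFlatR rest) := by
  have h1 : g.toNat = (g.toNat - 1) + 1 := by omega
  simp only [pvFlatR, List.flatMap_cons]
  rw [h1, List.replicate_succ]
  simp

theorem pvPop_corr (lt : List Char) (k cnt n i : Int) (c : Char) :
    ∀ (gs : List (Char × Int)) (rep m st2m : Int) (stk2 : List (Char × Int)) (rep2 : Int),
      pvWF gs → m = ((pvFlatR gs).length : Int) →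
      pvPopB lt k cnt n i c gs m rep = (stk2, st2m, rep2) →
      pvPopA lt k cnt (n - i - 1) c (pvFlatR gs) rep = (pvFlatR stk2, rep2) ∧
      pvWF stk2 ∧ st2m = ((pvFlatR stk2).length : Int) ∧
      pvBlocked lt k cnt (n - i - 1) c rep2 (pvFlatR stk2) := by
  intro gs
  induction gs with
  | nil =>
    intro rep m st2m stk2 rep2 _ hm heq
    rw [pvPopB] at heq
    injection heq with h1 h23
    injection h23 with h2 h3
    subst h1 h2 h3 hm
    refine ⟨?_, ?_, ?_, ?_⟩ <;> simp [pvPopA, pvPopB, pvFlatR, pvWF, pvBlocked]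
  | cons hd rest ih =>
    obtain ⟨t, g⟩ := hd
    intro rep m st2m stk2 rep2 hwf hm heq
    have hg1 : (1 : Int) ≤ g := hwf (t, g) (by simp)
    have hwrest : pvWF rest := fun q hq => hwf q (by simp [hq])
    have hgn : 1 ≤ g.toNat := by omega
    have hcast : ((g.toNat : Nat) : Int) = g := by omega
    have hflat : pvFlatR ((t, g) :: rest) = List.replicate g.toNat t ++ pvFlatR rest := by
      simp [pvFlatR]
    set xl : Int := ((pvFlatR rest).length : Int) with hxl
    have hlen : ((pvFlatR ((t, g) :: rest)).length : Int) = g + xl := by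
      rw [hflat, hxl]; push_cast; simp; omega
    subst hm
    rw [hlen] at heq
    rw [hflat, pvPop_group lt k cnt (n - i - 1) c t g.toNat (pvFlatR rest) rep hgn,
      hcast, ← hxl]
    rw [pvPopB] at heq
    by_cases hct : c < t
    · rw [if_pos hct] at heq
      by_cases hl : lt = [t]
      · subst hl
        simp only [eq_self_iff_true, if_true, pvP, pvR] at heq ⊢
        rw [show g + xl + (n - i - 1) + 1 - k = g + xl + n - i - k from by ring]
        by_cases hple : min (min g (g + xl + n - i - k)) (cnt - rep) ≤ 0
        · rw [if_pos hple] at heq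
          injection heq with h1 h23
          injection h23 with h2 h3
          subst h1 h2 h3
          rw [if_neg (show ¬(c < t ∧ 0 < min (min g (g + xl + n - i - k)) (cnt - rep))
            from by rintro ⟨-, hx⟩; omega)]
          refine ⟨by rw [hflat], hwf, by rw [hlen], ?_⟩
          rw [pvFlatR_cons_head t g rest hg1]
          rintro ⟨c1, c2, c3⟩
          rcases c3 with c3 | c3
          · exact c3 rfl
          · simp only [List.length_append, List.length_replicate] at c2
            simp only [min_def] at hple
            split_ifs at hple <;> omega
        · rw [if_neg hple] at heq
          rw [if_pos (show c < t ∧ 0 < min (min g (g + xl + n - i - k)) (cnt - rep)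
            from ⟨hct, by omega⟩)]
          by_cases htop : min (min g (g + xl + n - i - k)) (cnt - rep) = g
          · rw [if_pos htop] at heq
            rw [if_pos htop]
            rw [show g + xl - min (min g (g + xl + n - i - k)) (cnt - rep) = xl from by
              rw [htop]; ring] at heq
            exact ih (rep + min (min g (g + xl + n - i - k)) (cnt - rep)) xl st2m stk2
              rep2 hwrest rfl heq
          · rw [if_neg htop] at heq
            injection heq with h1 h23
            injection h23 with h2 h3
            subst h1 h2 h3
            rw [if_neg htop]
            have hlt : min (min g (g + xl + n - i - k)) (cnt - rep) < g := by
              rcases lt_or_ge (min (min g (g + xl + n - i - k)) (cnt - rep)) g with h | h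
              · exact h
              · exfalso; apply htop
                simp only [min_def] at h ⊢
                split_ifs at h ⊢ <;> omega
            have hflat2 : pvFlatR ((t, g - min (min g (g + xl + n - i - k)) (cnt - rep))
                :: rest)
                = List.replicate (g.toNat -
                    (min (min g (g + xl + n - i - k)) (cnt - rep)).toNat) t
                  ++ pvFlatR rest := by
              simp only [pvFlatR, List.flatMap_cons]
              congr 2
              omega
            refine ⟨by rw [hflat2], ?_, ?_, ?_⟩
            · intro q hq
              rcases List.mem_cons.mp hq with he | hm
              · subst he; simp; omega
              · exact hwrest q hm
            · rw [hflat2]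
              push_cast
              simp only [List.length_append, List.length_replicate]
              push_cast
              omega
            · rw [pvFlatR_cons_head t (g - min (min g (g + xl + n - i - k)) (cnt - rep))
                rest (by omega)]
              rintro ⟨c1, c2, c3⟩
              rcases c3 with c3 | c3
              · exact c3 rfl
              · simp only [List.length_append, List.length_replicate] at c2
                simp only [min_def] at hlt hple c3 c2 ⊢
                split_ifs at hlt hple c3 c2 <;> omega
      · simp only [if_neg hl, pvP, pvR] at heq ⊢
        rw [show g + xl + (n - i - 1) + 1 - k = g + xl + n - i - k from by ring]
        by_cases hple : min g (g + xl + n - i - k) ≤ 0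
        · rw [if_pos hple] at heq
          injection heq with h1 h23
          injection h23 with h2 h3
          subst h1 h2 h3
          rw [if_neg (show ¬(c < t ∧ 0 < min g (g + xl + n - i - k))
            from by rintro ⟨-, hx⟩; omega)]
          refine ⟨by rw [hflat], hwf, by rw [hlen], ?_⟩
          rw [pvFlatR_cons_head t g rest hg1]
          rintro ⟨c1, c2, c3⟩
          simp only [List.length_append, List.length_replicate] at c2
          simp only [min_def] at hple
          split_ifs at hple <;> omega
        · rw [if_neg hple] at heq
          rw [if_pos (show c < t ∧ 0 < min g (g + xl + n - i - k)
            from ⟨hct, by omega⟩)]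
          by_cases htop : min g (g + xl + n - i - k) = g
          · rw [if_pos htop] at heq
            rw [if_pos htop]
            rw [show g + xl - min g (g + xl + n - i - k) = xl from by rw [htop]; ring] at heq
            exact ih rep xl st2m stk2 rep2 hwrest rfl heq
          · rw [if_neg htop] at heq
            injection heq with h1 h23
            injection h23 with h2 h3
            subst h1 h2 h3
            rw [if_neg htop]
            have hlt : min g (g + xl + n - i - k) < g := by
              simp only [min_def] at htop ⊢
              split_ifs at htop ⊢ <;> omega
            have hflat2 : pvFlatR ((t, g - min g (g + xl + n - i - k)) :: rest)
                = List.replicate (g.toNat - (min g (g + xl + n - i - k)).toNat) t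
                  ++ pvFlatR rest := by
              simp only [pvFlatR, List.flatMap_cons]
              congr 2
              omega
            refine ⟨by rw [hflat2], ?_, ?_, ?_⟩
            · intro q hq
              rcases List.mem_cons.mp hq with he | hm
              · subst he; simp; omega
              · exact hwrest q hm
            · rw [hflat2]
              push_cast
              simp only [List.length_append, List.length_replicate]
              push_cast
              omega
            · rw [pvFlatR_cons_head t (g - min g (g + xl + n - i - k)) rest (by omega)]
              rintro ⟨c1, c2, c3⟩
              simp only [List.length_append, List.length_replicate] at c2
              simp only [min_def] at hlt hple c2 ⊢
              split_ifs at hlt hple c2 <;> omega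
    · rw [if_neg hct] at heq
      injection heq with h1 h23
      injection h23 with h2 h3
      subst h1 h2 h3
      rw [if_neg (show ¬(c < t ∧
          0 < pvP lt t k (n - i - 1) cnt g xl rep) from by rintro ⟨hx, -⟩; exact hct hx)]
      refine ⟨by rw [hflat], hwf, by rw [hlen], ?_⟩
      rw [pvFlatR_cons_head t g rest hg1]
      rintro ⟨c1, c2, c3⟩
      exact hct c1

theorem pvStep_blocked (lt : List Char) (k n : Int) (c : Char) (i : Int)
    (st : List Char) (rep cnt : Int)
    (hb : pvBlocked lt k cnt (n - i - 1) c rep st) :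
    pvBlocked lt k (pvStep lt k c (st, rep, cnt)).2.2 (n - (i + 1) - 1) c
      (pvStep lt k c (st, rep, cnt)).2.1 (pvStep lt k c (st, rep, cnt)).1 := by
  have hcnt2 : (pvStep lt k c (st, rep, cnt)).2.2 = (if lt = [c] then cnt - 1 else cnt) := by
    simp only [pvStep]
  rw [hcnt2]
  have hcle : (if lt = [c] then cnt - 1 else cnt) ≤ cnt := by split_ifs <;> omega
  by_cases hlen : (st.length : Int) < k
  · by_cases hl : lt = [c]
    · have h1 : (pvStep lt k c (st, rep, cnt)).1 = c :: st := by
        simp [pvStep, hlen, hl]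
      have h2 : (pvStep lt k c (st, rep, cnt)).2.1 = rep - 1 := by
        simp [pvStep, hlen, hl]
      rw [h1, h2]
      exact pvBlocked_head lt k _ _ c st _
    · by_cases hr : k - (st.length : Int) > rep
      · have h1 : (pvStep lt k c (st, rep, cnt)).1 = c :: st := by
          simp [pvStep, hlen, hl, hr]
        have h2 : (pvStep lt k c (st, rep, cnt)).2.1 = rep := by
          simp [pvStep, hlen, hl, hr]
        rw [h1, h2]
        exact pvBlocked_head lt k _ _ c st _
      · have h1 : (pvStep lt k c (st, rep, cnt)).1 = st := by
          simp [pvStep, hlen, hl, hr]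
        have h2 : (pvStep lt k c (st, rep, cnt)).2.1 = rep := by
          simp [pvStep, hlen, hl, hr]
        rw [h1, h2]
        exact pvBlocked_mono lt k cnt _ (n - i - 1) (n - (i + 1) - 1) c st rep
          (by omega) hcle hb
  · have h1 : (pvStep lt k c (st, rep, cnt)).1 = st := by
      simp [pvStep, hlen]
    have h2 : (pvStep lt k c (st, rep, cnt)).2.1 = rep := by
      simp [pvStep, hlen]
    rw [h1, h2]
    exact pvBlocked_mono lt k cnt _ (n - i - 1) (n - (i + 1) - 1) c st rep
      (by omega) hcle hb

theorem pvMid (lt : List Char) (k n : Int) (c : Char) (next : List Char) :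
    ∀ (j : Nat) (i : Int) (st : List Char) (rep cnt : Int),
      pvBlocked lt k cnt (n - i - 1) c rep st →
      pvLoopA lt k n (List.replicate j c ++ next) i (st, rep, cnt)
        = pvLoopA lt k n next (i + j) (pvStepIter lt k c j (st, rep, cnt)) := by
  intro j
  induction j with
  | zero =>
    intro i st rep cnt _
    simp [pvStepIter]
  | succ j ih =>
    intro i st rep cnt hb
    rw [List.replicate_succ, List.cons_append, pvLoopA]
    simp only [pvPopA_blocked lt k cnt (n - i - 1) c st rep hb]
    have hcnt2 : (pvStep lt k c (st, rep, cnt)).2.2 = (if lt = [c] then cnt - 1 else cnt) := by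
      simp only [pvStep]
    have hb' := pvStep_blocked lt k n c i st rep cnt hb
    have hstep := ih (i + 1) (pvStep lt k c (st, rep, cnt)).1
      (pvStep lt k c (st, rep, cnt)).2.1 (pvStep lt k c (st, rep, cnt)).2.2 hb'
    have hL : pvLoopA lt k n (List.replicate j c ++ next) (i + 1)
        ((pvStep lt k c (st, rep, cnt)).1, (pvStep lt k c (st, rep, cnt)).2.1,
          (pvStep lt k c (st, rep, cnt)).2.2)
        = pvLoopA lt k n next (i + ((j : Nat) + 1 : Nat))
          (pvStepIter lt k c (j + 1) (st, rep, cnt)) := by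
      rw [show ((pvStep lt k c (st, rep, cnt)).1, (pvStep lt k c (st, rep, cnt)).2.1,
            (pvStep lt k c (st, rep, cnt)).2.2) = pvStep lt k c (st, rep, cnt) from rfl,
        hstep, pvStepIter]
      congr 1
      push_cast; ring
    rw [← hL]
    rfl

theorem pvClose_letter (lt : List Char) (k : Int) (c : Char) (hc : lt = [c]) :
    ∀ (j : Nat) (st : List Char) (rep cnt : Int),
      pvStepIter lt k c j (st, rep, cnt) =
        (List.replicate (min (j : Int) (k - st.length)).toNat c ++ st,
         rep - max 0 (min (j : Int) (k - st.length)), cnt - j) := by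
  intro j
  induction j with
  | zero =>
    intro st rep cnt
    have h1 : (min ((0 : Nat) : Int) (k - st.length)).toNat = 0 := by omega
    have h2 : max 0 (min ((0 : Nat) : Int) (k - st.length)) = 0 := by omega
    rw [pvStepIter, h1, h2]
    simp
  | succ j ih =>
    intro st rep cnt
    by_cases hlen : (st.length : Int) < k
    · rw [pvStepIter, show pvStep lt k c (st, rep, cnt) = (c :: st, rep - 1, cnt - 1) from by
        simp [pvStep, hc, hlen], ih]
      simp only [Prod.mk.injEq, List.length_cons]
      refine ⟨?_, ?_, ?_⟩
      · have h1 : (min (((j : Nat) + 1 : Nat) : Int) (k - st.length)).toNat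
            = (min ((j : Nat) : Int) (k - ((st.length : Int) + 1))).toNat + 1 := by
          push_cast; omega
        rw [show ((st.length + 1 : Nat) : Int) = (st.length : Int) + 1 from by push_cast; ring,
          h1, List.replicate_succ']
        simp
      · push_cast; omega
      · push_cast; omega
    · rw [pvStepIter, show pvStep lt k c (st, rep, cnt) = (st, rep, cnt - 1) from by
        simp [pvStep, hc, hlen], ih]
      simp only [Prod.mk.injEq]
      refine ⟨?_, ?_, ?_⟩
      · have h1 : (min ((j : Nat) : Int) (k - st.length)).toNat
            = (min (((j : Nat) + 1 : Nat) : Int) (k - st.length)).toNat := by push_cast; omega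
        rw [h1]
      · push_cast; omega
      · push_cast; omega

theorem pvClose_other (lt : List Char) (k : Int) (c : Char) (hc : lt ≠ [c]) :
    ∀ (j : Nat) (st : List Char) (rep cnt : Int),
      pvStepIter lt k c j (st, rep, cnt) =
        (List.replicate (min (j : Int) (min (k - st.length) (k - st.length - rep))).toNat c ++ st,
         rep, cnt) := by
  intro j
  induction j with
  | zero =>
    intro st rep cnt
    have h1 : (min ((0 : Nat) : Int) (min (k - st.length) (k - st.length - rep))).toNat = 0 := by
      omega
    rw [pvStepIter, h1]
    simp
  | succ j ih =>
    intro st rep cnt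
    by_cases hpush : (st.length : Int) < k ∧ k - (st.length : Int) > rep
    · rw [pvStepIter, show pvStep lt k c (st, rep, cnt) = (c :: st, rep, cnt) from by
        simp [pvStep, hc, hpush.1, hpush.2], ih]
      simp only [Prod.mk.injEq, List.length_cons, and_true]
      have h1 : (min (((j : Nat) + 1 : Nat) : Int) (min (k - st.length) (k - st.length - rep))).toNat
          = (min ((j : Nat) : Int)
              (min (k - ((st.length : Int) + 1)) (k - ((st.length : Int) + 1) - rep))).toNat + 1 := by
        push_cast; omega
      rw [show ((st.length + 1 : Nat) : Int) = (st.length : Int) + 1 from by push_cast; ring,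
        h1, List.replicate_succ']
      simp
    · have hstep : pvStep lt k c (st, rep, cnt) = (st, rep, cnt) := by
        rcases not_and_or.mp hpush with h | h
        · simp [pvStep, hc, h]
        · by_cases hlen : (st.length : Int) < k
          · simp [pvStep, hc, hlen, h]
          · simp [pvStep, hc, hlen]
      rw [pvStepIter, hstep, ih]
      simp only [Prod.mk.injEq, and_true]
      have h1 : (min ((j : Nat) : Int) (min (k - st.length) (k - st.length - rep))).toNat
          = (min (((j : Nat) + 1 : Nat) : Int) (min (k - st.length) (k - st.length - rep))).toNat := by
        push_cast; omega
      rw [h1]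

theorem pvLoop_corr (lt : List Char) (k n : Int) :
    ∀ (runs : List (Char × Int)) (i : Int) (gs : List (Char × Int)) (rep cnt : Int),
      pvWF runs → pvWF gs →
      pvLoopA lt k n (pvFlatR runs) i (pvFlatR gs, rep, cnt)
        = pvFlatR (pvLoopB lt k n runs i (gs, ((pvFlatR gs).length : Int), rep, cnt)) := by
  intro runs
  induction runs with
  | nil =>
    intro i gs rep cnt _ _
    simp [pvLoopA, pvLoopB, pvFlatR]
  | cons hd rs ih =>
    obtain ⟨c, L⟩ := hd
    intro i gs rep cnt hwfr hwfg
    have hL : (1 : Int) ≤ L := hwfr (c, L) (by simp)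
    have hwrs : pvWF rs := fun q hq => hwfr q (by simp [hq])
    have hcastL : ((L.toNat : Nat) : Int) = L := by omega
    obtain ⟨j, hj⟩ : ∃ j, L.toNat = j + 1 := ⟨L.toNat - 1, by omega⟩
    have hflat : pvFlatR ((c, L) :: rs) = List.replicate L.toNat c ++ pvFlatR rs := by
      simp [pvFlatR]
    rw [hflat, pvLoopB]
    rcases hpr : pvPopB lt k cnt n i c gs ((pvFlatR gs).length : Int) rep with
      ⟨stk2, m2, rep2⟩
    obtain ⟨hA, hwf2, hm2, hblk⟩ :=
      pvPop_corr lt k cnt n i c gs rep ((pvFlatR gs).length : Int) m2 stk2 rep2 hwfg rfl hpr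
    rw [hj, List.replicate_succ, List.cons_append, pvLoopA, hA]
    dsimp only
    change pvLoopA lt k n (List.replicate j c ++ pvFlatR rs) (i + 1)
        ((pvStep lt k c (pvFlatR stk2, rep2, cnt)).1,
         (pvStep lt k c (pvFlatR stk2, rep2, cnt)).2.1,
         (pvStep lt k c (pvFlatR stk2, rep2, cnt)).2.2) = _
    rw [pvMid lt k n c (pvFlatR rs) j (i + 1)
        (pvStep lt k c (pvFlatR stk2, rep2, cnt)).1
        (pvStep lt k c (pvFlatR stk2, rep2, cnt)).2.1
        (pvStep lt k c (pvFlatR stk2, rep2, cnt)).2.2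
        (pvStep_blocked lt k n c i (pvFlatR stk2) rep2 cnt hblk)]
    rw [show ((pvStep lt k c (pvFlatR stk2, rep2, cnt)).1,
        (pvStep lt k c (pvFlatR stk2, rep2, cnt)).2.1,
        (pvStep lt k c (pvFlatR stk2, rep2, cnt)).2.2)
        = pvStep lt k c (pvFlatR stk2, rep2, cnt) from rfl]
    rw [show pvStepIter lt k c j (pvStep lt k c (pvFlatR stk2, rep2, cnt))
        = pvStepIter lt k c (j + 1) (pvFlatR stk2, rep2, cnt) from rfl]
    rw [show i + 1 + (j : Int) = i + L from by omega, ← hj]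
    by_cases hl : lt = [c]
    · rw [pvClose_letter lt k c hl L.toNat (pvFlatR stk2) rep2 cnt, hcastL, ← hm2]
      rw [if_pos hl]
      by_cases hpos : 0 < min L (k - m2)
      · rw [if_pos hpos]
        rw [show max 0 (min L (k - m2)) = min L (k - m2) from by omega]
        have hwf3 : pvWF ((c, min L (k - m2)) :: stk2) := by
          intro q hq
          rcases List.mem_cons.mp hq with he | hm
          · subst he; simp; omega
          · exact hwf2 q hm
        have hflat3 : pvFlatR ((c, min L (k - m2)) :: stk2)
            = List.replicate (min L (k - m2)).toNat c ++ pvFlatR stk2 := by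
          simp [pvFlatR]
        have harg : m2 + min L (k - m2)
            = ((pvFlatR ((c, min L (k - m2)) :: stk2)).length : Int) := by
          rw [hflat3]
          simp only [List.length_append, List.length_replicate]
          push_cast
          omega
        rw [harg, ← hflat3]
        exact ih (i + L) ((c, min L (k - m2)) :: stk2) (rep2 - min L (k - m2)) (cnt - L)
          hwrs hwf3
      · rw [if_neg hpos]
        rw [show (min L (k - m2)).toNat = 0 from by omega,
          show max 0 (min L (k - m2)) = 0 from by omega]
        simp only [List.replicate_zero, List.nil_append, sub_zero]
        rw [show m2 = ((pvFlatR stk2).length : Int) from hm2]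
        exact ih (i + L) stk2 rep2 (cnt - L) hwrs hwf2
    · rw [pvClose_other lt k c hl L.toNat (pvFlatR stk2) rep2 cnt, hcastL, ← hm2]
      rw [if_neg hl]
      by_cases hpos : 0 < min L (min (k - m2) (k - m2 - rep2))
      · rw [if_pos hpos]
        have hwf3 : pvWF ((c, min L (min (k - m2) (k - m2 - rep2))) :: stk2) := by
          intro q hq
          rcases List.mem_cons.mp hq with he | hm
          · subst he; simp; omega
          · exact hwf2 q hm
        have hflat3 : pvFlatR ((c, min L (min (k - m2) (k - m2 - rep2))) :: stk2)
            = List.replicate (min L (min (k - m2) (k - m2 - rep2))).toNat c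
              ++ pvFlatR stk2 := by
          simp [pvFlatR]
        have harg : m2 + min L (min (k - m2) (k - m2 - rep2))
            = ((pvFlatR ((c, min L (min (k - m2) (k - m2 - rep2))) :: stk2)).length
              : Int) := by
          rw [hflat3]
          simp only [List.length_append, List.length_replicate]
          push_cast
          omega
        rw [harg, ← hflat3]
        exact ih (i + L) ((c, min L (min (k - m2) (k - m2 - rep2))) :: stk2) rep2 cnt
          hwrs hwf3
      · rw [if_neg hpos]
        rw [show (min L (min (k - m2) (k - m2 - rep2))).toNat = 0 from by omega]
        simp only [List.replicate_zero, List.nil_append]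
        rw [show m2 = ((pvFlatR stk2).length : Int) from hm2]
        exact ih (i + L) stk2 rep2 cnt hwrs hwf2

def pvRLEstep (rs : List (Char × Int)) (ch : Char) : List (Char × Int) :=
  match rs with
  | (c, g) :: rest => if c = ch then (c, g + 1) :: rest else (ch, 1) :: (c, g) :: rest
  | [] => [(ch, 1)]

theorem pvRLE_step (acc : List (Char × Int)) (ch : Char) (hwf : pvWF acc) :
    pvFlatR (pvRLEstep acc ch).reverse = pvFlatR acc.reverse ++ [ch] ∧
    pvWF (pvRLEstep acc ch) := by
  cases acc with
  | nil => constructor <;> simp [pvFlatR, pvWF, pvRLEstep]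
  | cons p rest =>
    obtain ⟨c, g⟩ := p
    have hg : 1 ≤ g := hwf (c, g) (by simp)
    have hrest : pvWF rest := fun q hq => hwf q (by simp [hq])
    by_cases hce : c = ch
    · subst hce
      rw [show pvRLEstep ((c, g) :: rest) c = (c, g + 1) :: rest from by
        simp [pvRLEstep]]
      refine ⟨?_, ?_⟩
      · simp only [pvFlatR, List.reverse_cons, List.flatMap_append, List.flatMap_cons,
          List.flatMap_nil, List.append_nil, List.append_assoc]
        have htn : (g + 1).toNat = g.toNat + 1 := by omega
        rw [htn, List.replicate_succ']
      · intro q hq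
        rcases List.mem_cons.mp hq with he | hm
        · subst he; simp; omega
        · exact hrest q hm
    · rw [show pvRLEstep ((c, g) :: rest) ch = (ch, 1) :: (c, g) :: rest from by
        simp [pvRLEstep, hce]]
      refine ⟨?_, ?_⟩
      · simp only [pvFlatR, List.reverse_cons, List.flatMap_append, List.flatMap_cons,
          List.flatMap_nil, List.append_nil, List.append_assoc]
        simp
      · intro q hq
        rcases List.mem_cons.mp hq with he | hm
        · subst he; simp
        · exact hwf q hm

theorem pvRLE_fold (cs : List Char) :
    ∀ (acc : List (Char × Int)), pvWF acc →
      pvFlatR ((cs.foldl pvRLEstep acc).reverse) = pvFlatR acc.reverse ++ cs ∧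
      pvWF (cs.foldl pvRLEstep acc) := by
  induction cs with
  | nil => intro acc hwf; exact ⟨by simp, hwf⟩
  | cons ch rest ih =>
    intro acc hwf
    obtain ⟨h1, h2⟩ := pvRLE_step acc ch hwf
    obtain ⟨h3, h4⟩ := ih _ h2
    refine ⟨?_, h4⟩
    simp only [List.foldl_cons]
    rw [h3, h1]
    simp

theorem pvRLE_spec (cs : List Char) :
    pvFlatR ((pvRLErev cs).reverse) = cs ∧ pvWF ((pvRLErev cs).reverse) := by
  have he : pvRLErev cs = cs.foldl pvRLEstep [] := rfl
  rw [he]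
  obtain ⟨h1, h2⟩ := pvRLE_fold cs [] (fun q hq => by cases hq)
  exact ⟨by simpa [pvFlatR] using h1, fun q hq => h2 q (by simpa using hq)⟩

theorem pvFlatR_reverse (rs : List (Char × Int)) :
    pvFlatR rs.reverse = (pvFlatR rs).reverse := by
  simp only [pvFlatR, List.reverse_flatMap]
  apply List.flatMap_congr
  intro p
  simp [List.reverse_replicate]

-- ===== VERDICT (by name: the statement is the Claim_ definition above) =====
theorem smallestSubsequence_spec : Claim_equal_smallestSubsequence := by
  intro s k letter repetition _
  unfold Spec_smallestSubsequence smallestSubsequence smallestSubsequence_alt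
  obtain ⟨hflat, hwf⟩ := pvRLE_spec s.toList
  have h := pvLoop_corr letter.toList k (s.toList.length : Int)
      ((pvRLErev s.toList).reverse) 0 [] repetition
      ((PySem.Str.count s letter : Nat) : Int) hwf (by intro p hp; cases hp)
  rw [show pvFlatR ([] : List (Char × Int)) = [] from rfl, hflat] at h
  simp only [List.length_nil, Nat.cast_zero] at h
  simp only [h, pvFlatR_reverse]
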